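-- pv_equiv track=rewrite | github.com/newtoallofthis123/leet-code | python/easy/monotonic-array.py | isDecreasingMonotonic
-- ===== SOURCE A (Python) =====
-- def isDecreasingMonotonic(nums):
--     i = 0
--     # decreasing part
--     while i < len(nums)-1:
--         if nums[i] >= nums[i+1]:
--             i = i+1
--         else:
--             return False
--     return True
-- ===== SOURCE B (Python) =====
-- def isDecreasingMonotonic(nums):
--     return nums == sorted(nums, reverse=True)
-- ===== Notes on version B (the rewrite author's own statement) =====
-- stated objective: simpler
-- what changed: Replaces the index-based early-exit adjacent-pair while loop with a one-line sort-then-compare: the list is non-increasing iff it equals its descending-sorted copy.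
import Mathlib
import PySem

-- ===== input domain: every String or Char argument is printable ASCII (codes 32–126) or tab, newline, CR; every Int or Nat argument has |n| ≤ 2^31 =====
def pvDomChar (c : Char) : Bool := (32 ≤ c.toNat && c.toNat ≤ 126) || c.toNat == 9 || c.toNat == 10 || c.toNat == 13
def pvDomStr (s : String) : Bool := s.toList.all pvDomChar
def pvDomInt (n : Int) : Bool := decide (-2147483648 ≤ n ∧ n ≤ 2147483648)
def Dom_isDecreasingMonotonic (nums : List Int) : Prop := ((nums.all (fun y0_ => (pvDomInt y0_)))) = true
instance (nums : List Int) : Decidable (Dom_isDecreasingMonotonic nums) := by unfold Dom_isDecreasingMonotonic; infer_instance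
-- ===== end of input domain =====

-- B replaces A's index-based early-exit adjacent-pair scan with a one-line
-- sort-then-compare (nums == sorted(nums, reverse=True)); objective: simpler.

-- ===== PORT A =====
-- the while loop of A, index i, early return False on an increasing pair
def pvLoopA (nums : List Int) (i : Nat) : Bool :=
  if i < nums.length - 1 then
    if nums.getD (i+1) 0 ≤ nums.getD i 0 then pvLoopA nums (i+1) else false
  else true
termination_by nums.length - i

def isDecreasingMonotonic (nums : List Int) : Bool := pvLoopA nums 0

-- ===== PORT B =====
def isDecreasingMonotonic_alt (nums : List Int) : Bool :=
  nums == PySem.List.sorted nums (fun x => x) true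

-- ===== PRECONDITION & SPEC =====
def Spec_isDecreasingMonotonic (nums : List Int) (out : Bool) : Prop := out = isDecreasingMonotonic_alt nums
instance (nums : List Int) (out : Bool) : Decidable (Spec_isDecreasingMonotonic nums out) := by unfold Spec_isDecreasingMonotonic; infer_instance

-- ===== CLAIM (what is proved, stated in full; the proofs are below) =====
def Claim_equal_isDecreasingMonotonic : Prop := ∀ (nums : List Int), Dom_isDecreasingMonotonic nums → Spec_isDecreasingMonotonic nums (isDecreasingMonotonic nums)

-- ===== LEMMAS AND PROOFS =====

-- A's loop from index i decides whether the suffix nums.drop i is non-increasing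
lemma pvLoopA_eq_chain (nums : List Int) (i : Nat) :
    pvLoopA nums i = decide ((nums.drop i).IsChain (fun a b => b ≤ a)) := by
  induction i using pvLoopA.induct nums with
  | case1 i hlt hcmp ih =>
    have hi : i < nums.length := by omega
    have hi1 : i + 1 < nums.length := by omega
    rw [pvLoopA]
    simp only [hlt, if_true, hcmp, if_true, ih]
    rw [List.drop_eq_getElem_cons hi]
    have hh : (nums.drop (i+1)).head? = some nums[i+1] := by
      rw [List.head?_drop, List.getElem?_eq_getElem hi1]
    have hget : nums.getD (i+1) 0 ≤ nums.getD i 0 := hcmp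
    rw [List.getD_eq_getElem _ _ hi, List.getD_eq_getElem _ _ hi1] at hget
    rw [decide_eq_decide]
    constructor
    · intro hc
      rw [List.isChain_cons]
      refine ⟨?_, hc⟩
      intro y hy
      simp only [hh, Option.mem_def, Option.some.injEq] at hy
      subst hy
      exact hget
    · intro hc
      rw [List.isChain_cons] at hc
      exact hc.2
  | case2 i hlt hcmp =>
    have hi : i < nums.length := by omega
    have hi1 : i + 1 < nums.length := by omega
    rw [pvLoopA]
    simp only [hlt, if_true, hcmp, if_false]
    rw [List.drop_eq_getElem_cons hi]
    have hh : (nums.drop (i+1)).head? = some nums[i+1] := by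
      rw [List.head?_drop, List.getElem?_eq_getElem hi1]
    rw [List.getD_eq_getElem _ _ hi, List.getD_eq_getElem _ _ hi1] at hcmp
    symm
    rw [decide_eq_false_iff_not, List.isChain_cons]
    intro hcontra
    have hle := hcontra.1 nums[i+1] (by rw [hh]; rfl)
    omega
  | case3 i hlt =>
    rw [pvLoopA]
    simp only [hlt, if_false]
    have hlen : (nums.drop i).length ≤ 1 := by
      rw [List.length_drop]; omega
    match hd : nums.drop i with
    | [] => simp
    | [a] => simp
    | a :: b :: t => rw [hd] at hlen; simp at hlen

-- ===== VERDICT (by name: the statement is the Claim_ definition above) =====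
theorem isDecreasingMonotonic_spec : Claim_equal_isDecreasingMonotonic := by
  intro nums _
  unfold Spec_isDecreasingMonotonic isDecreasingMonotonic isDecreasingMonotonic_alt
  rw [pvLoopA_eq_chain]
  simp only [List.drop_zero]
  haveI : Trans (fun a b : Int => b ≤ a) (fun a b : Int => b ≤ a) (fun a b : Int => b ≤ a) :=
    ⟨fun h1 h2 => le_trans h2 h1⟩
  have hiff : List.IsChain (fun a b : Int => b ≤ a) nums ↔
      nums = PySem.List.sorted nums (fun x => x) true := by
    rw [List.isChain_iff_pairwise]
    constructor
    · intro hp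
      exact (PySem.List.sorted_rev_eq_self_of_pairwise nums (fun x => x) hp).symm
    · intro heq
      have hpw := PySem.List.sorted_pairwise_rev (xs := nums) (key := fun (x : Int) => x)
      rwa [← heq] at hpw
  rw [Bool.eq_iff_iff]
  simp [hiff, beq_iff_eq]
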